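-- pv_equiv track=rewrite | github.com/codenginebd/carsscraper | utils/ConverterMarcedes.py | CheckIfTelephoneNumber
-- ===== SOURCE A (Python) =====
-- def CheckIfTelephoneNumber(data):
--     data = data.strip()
--     if data != "":
--         for i in data:
--             if (i >= "0" and i <= "9") or i == "-" or i == "." or i == "(" or i == ")" or i == " ":
--                 continue
--             else:
--                 return False
--     else:
--         return False
--     return True
-- ===== SOURCE B (Python) =====
-- _ALLOWED = "0123456789.()- "
--
-- def CheckIfTelephoneNumber(data):
--     # Count, for each allowed character, its occurrences in the stripped string;
--     # the string is valid iff it is non-empty and those counts account for every position.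
--     s = data.strip()
--     return s != "" and sum(s.count(ch) for ch in _ALLOWED) == len(s)
-- ===== Notes on version B (the rewrite author's own statement) =====
-- stated objective: alternative
-- what changed: Instead of scanning the string character by character with early returns, B iterates over the 15-character allowed alphabet, counts each allowed character's occurrences in the stripped string with str.count, and accepts iff the counts sum to the string's length (correct because the allowed characters are distinct, so the sum equals the number of positions holding an allowed character).
import Mathlib
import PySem

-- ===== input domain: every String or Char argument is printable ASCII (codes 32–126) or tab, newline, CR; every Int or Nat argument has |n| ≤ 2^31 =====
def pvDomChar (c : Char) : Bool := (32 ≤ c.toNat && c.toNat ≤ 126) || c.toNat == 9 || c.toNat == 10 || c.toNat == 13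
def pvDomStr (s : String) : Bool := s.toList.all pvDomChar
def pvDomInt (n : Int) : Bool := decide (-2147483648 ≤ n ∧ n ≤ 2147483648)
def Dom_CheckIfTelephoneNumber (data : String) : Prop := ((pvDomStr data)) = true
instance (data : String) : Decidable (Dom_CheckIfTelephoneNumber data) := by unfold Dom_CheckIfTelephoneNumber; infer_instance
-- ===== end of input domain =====

-- B replaces A's per-character scan by a pass over the 15-character alphabet: count each allowed
-- character's occurrences and check the counts account for the whole stripped string (alternative, same cost).
-- ===== PORT A =====
-- the 'for i in data: … return False / continue' loop ending in 'return True'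
def pvLoopA : List Char → Bool
  | [] => true
  | c :: rest =>
      if (decide ('0' ≤ c) && decide (c ≤ '9')) || c == '-' || c == '.' || c == '(' || c == ')' || c == ' ' then
        pvLoopA rest
      else
        false

def CheckIfTelephoneNumber (data : String) : Bool :=
  let data := PySem.Str.strip data
  if data ≠ "" then pvLoopA data.toList else false

-- ===== PORT B =====
def pvAllowed : List Char := "0123456789.()- ".toList

def CheckIfTelephoneNumber_alt (data : String) : Bool :=
  let s := PySem.Str.strip data
  decide (s ≠ "") &&
    decide ((pvAllowed.map (fun ch => PySem.Str.count s (String.ofList [ch]))).sum = PySem.Str.len s)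

-- ===== PRECONDITION & SPEC =====
def Spec_CheckIfTelephoneNumber (data : String) (out : Bool) : Prop := out = CheckIfTelephoneNumber_alt data
instance (data : String) (out : Bool) : Decidable (Spec_CheckIfTelephoneNumber data out) := by unfold Spec_CheckIfTelephoneNumber; infer_instance

-- ===== CLAIM (what is proved, stated in full; the proofs are below) =====
def Claim_equal_CheckIfTelephoneNumber : Prop := ∀ (data : String), Dom_CheckIfTelephoneNumber data → Spec_CheckIfTelephoneNumber data (CheckIfTelephoneNumber data)

-- ===== LEMMAS AND PROOFS =====

-- Python s.count(ch) for a single character is the list count of that character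
lemma pvGoSingle (c : Char) : ∀ (fuel : Nat) (l : List Char) (acc : Nat), l.length ≤ fuel →
    PySem.Chars.count.go [c] fuel l acc = acc + l.count c := by
  intro fuel
  induction fuel with
  | zero => intro l acc h; simp at h; subst h; simp [PySem.Chars.count.go]
  | succ n ih =>
    intro l acc h
    cases l with
    | nil => simp [PySem.Chars.count.go]
    | cons a t =>
      rw [PySem.Chars.count.go]
      by_cases hc : a = c
      · subst hc
        simp only [List.isPrefixOf, beq_self_eq_true, Bool.true_and,
          if_true, List.length_cons, List.length_nil, Nat.zero_add, List.drop_one, List.tail_cons,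
          List.count_cons, beq_self_eq_true]
        rw [ih t (acc+1) (by simpa using h)]
        omega
      · have hpf : List.isPrefixOf [c] (a :: t) = false := by
          simp [List.isPrefixOf]; intro h'; exact absurd h'.symm hc
        rw [hpf]
        simp only [Bool.false_eq_true, if_false]
        rw [ih t acc (by simpa using h)]
        have hbc : (a == c) = false := by simp; exact hc
        simp [List.count_cons, hbc]

lemma pvCountSingle (c : Char) (s : List Char) : PySem.Chars.count s [c] = s.count c := by
  simp [PySem.Chars.count, pvGoSingle c s.length s 0 le_rfl]

-- summing 'count a l' over a duplicate-free alphabet A counts the positions of l holding a letter of A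
lemma pvSumMapAdd (A : List Char) (f g : Char → Nat) :
    (A.map (fun a => f a + g a)).sum = (A.map f).sum + (A.map g).sum := by
  induction A with
  | nil => simp
  | cons b B ih => simp only [List.map_cons, List.sum_cons, ih]; omega

lemma pvSumIte (x : Char) : ∀ (B : List Char), B.Nodup →
    (B.map (fun a => if x == a then 1 else 0)).sum = if B.contains x then 1 else 0 := by
  intro B
  induction B with
  | nil => simp
  | cons b B ih =>
    intro hnd
    obtain ⟨hnotin, hBnd⟩ := List.nodup_cons.mp hnd
    simp only [List.map_cons, List.sum_cons, ih hBnd, List.contains_cons]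
    by_cases hxb : x = b
    · subst hxb
      have hc : B.contains x = false := by
        simp only [List.contains_eq_mem, decide_eq_false_iff_not]; exact hnotin
      simp
      exact hnotin
    · have hbx : (x == b) = false := by simp [hxb]
      have hbx' : (b == x) = false := by simp; exact fun h => absurd h.symm hxb
      simp [hbx]

lemma pvSumCounts (A : List Char) (hA : A.Nodup) :
    ∀ (l : List Char), (A.map (fun a => l.count a)).sum = l.countP (fun c => A.contains c) := by
  intro l
  induction l with
  | nil => simp
  | cons x t ih =>
    have hc : ∀ a : Char, (x :: t).count a = t.count a + if x == a then 1 else 0 := by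
      intro a
      simp only [List.count_cons]
    simp only [hc, pvSumMapAdd, ih, pvSumIte x A hA, List.countP_cons]

-- A's loop condition admits exactly the characters of pvAllowed
lemma pvCondEqMem (c : Char) :
    ((decide ('0' ≤ c) && decide (c ≤ '9')) || c == '-' || c == '.' || c == '(' || c == ')' || c == ' ')
      = pvAllowed.contains c := by
  rw [Bool.eq_iff_iff]
  simp only [Bool.or_eq_true, Bool.and_eq_true, decide_eq_true_eq, beq_iff_eq,
    List.contains_eq_mem, pvAllowed, Char.le_def, UInt32.le_iff_toNat_le,
    show "0123456789.()- ".toList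
       = ['0','1','2','3','4','5','6','7','8','9','.','(',')','-',' '] from rfl,
    List.mem_cons, List.not_mem_nil, or_false]
  have hc : Char.ofNat c.toNat = c := Char.ofNat_toNat c
  constructor
  · rintro (((((⟨h1, h2⟩ | h) | h) | h) | h) | h)
    · have h1' : 48 ≤ c.toNat := h1
      have h2' : c.toNat ≤ 57 := h2
      have hd : c.toNat = 48 ∨ c.toNat = 49 ∨ c.toNat = 50 ∨ c.toNat = 51 ∨ c.toNat = 52 ∨
          c.toNat = 53 ∨ c.toNat = 54 ∨ c.toNat = 55 ∨ c.toNat = 56 ∨ c.toNat = 57 := by omega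
      rcases hd with h | h | h | h | h | h | h | h | h | h <;> rw [← hc, h] <;> decide
    all_goals (subst h; decide)
  · rintro (h | h | h | h | h | h | h | h | h | h | h | h | h | h | h) <;> subst h <;> decide

-- A's loop is the "every character allowed" test
lemma pvLoopAEqAll (l : List Char) : pvLoopA l = l.all (fun c => pvAllowed.contains c) := by
  induction l with
  | nil => rfl
  | cons c rest ih =>
      simp only [pvLoopA, List.all_cons, pvCondEqMem]
      cases hc : pvAllowed.contains c
      · simp
      · simp [ih]

-- ===== VERDICT (by name: the statement is the Claim_ definition above) =====
theorem CheckIfTelephoneNumber_spec : Claim_equal_CheckIfTelephoneNumber := by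
  intro data _
  unfold Spec_CheckIfTelephoneNumber CheckIfTelephoneNumber CheckIfTelephoneNumber_alt
  simp only [pvLoopAEqAll]
  by_cases h : PySem.Str.strip data = ""
  · simp [h]
  · have hcnt : ∀ ch : Char, PySem.Str.count (PySem.Str.strip data) (String.ofList [ch])
        = (PySem.Str.strip data).toList.count ch := by
      intro ch
      rw [PySem.Str.count_eq]
      simp only [String.toList_ofList]
      simpa using pvCountSingle ch (PySem.Str.strip data).toList
    rw [Bool.eq_iff_iff]
    simp only [h, ne_eq, not_false_iff, if_true, decide_eq_true_eq, Bool.and_eq_true,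
      List.all_eq_true, hcnt, pvSumCounts pvAllowed (by decide), PySem.Str.len_eq, true_and]
    rw [show ((PySem.Str.strip data).toList.length : Int)
        = (((PySem.Str.strip data).toList.length : Nat) : Int) from by simp]
    rw [Nat.cast_inj]
    exact ⟨fun hall => List.countP_eq_length.mpr hall, fun hc => List.countP_eq_length.mp hc⟩
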